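-- pv_equiv track=rewrite | github.com/Jonsnow-willow/GPUMD-Wizard | wizard/io.py | symbol_to_string
-- ===== SOURCE A (Python) =====
-- def symbol_to_string(symbols):
--     element_counts = {}
--     for element in symbols:
--         if element in element_counts:
--             element_counts[element] += 1
--         else:
--             element_counts[element] = 1
--     result_string = ''
--     for element, count in element_counts.items():
--         result_string += f'{element}{count}'
--     return result_string
-- ===== SOURCE B (Python) =====
-- def symbol_to_string(symbols):
--     parts = []
--     rest = symbols
--     while rest:
--         e = rest[0]
--         parts.append(f'{e}{rest.count(e)}')
--         rest = [x for x in rest[1:] if x != e]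
--     return ''.join(parts)
-- ===== Notes on version B (the rewrite author's own statement) =====
-- stated objective: alternative
-- what changed: Replaces A's dict-counter accumulation with a partition loop: repeatedly take the first remaining symbol, count it in the remainder, emit its piece and filter all its occurrences out, so no dictionary is ever built; pieces are joined at the end.
import Mathlib
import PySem

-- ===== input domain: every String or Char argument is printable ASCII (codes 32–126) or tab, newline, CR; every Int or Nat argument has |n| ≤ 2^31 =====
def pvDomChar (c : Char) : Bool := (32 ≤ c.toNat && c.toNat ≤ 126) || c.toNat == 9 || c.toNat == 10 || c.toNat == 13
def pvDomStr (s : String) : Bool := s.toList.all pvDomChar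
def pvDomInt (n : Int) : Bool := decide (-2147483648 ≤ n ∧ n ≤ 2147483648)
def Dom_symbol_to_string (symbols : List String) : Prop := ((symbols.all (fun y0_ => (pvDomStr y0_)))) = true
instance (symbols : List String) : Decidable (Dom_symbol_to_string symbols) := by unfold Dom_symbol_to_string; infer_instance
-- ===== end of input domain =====

-- B replaces A's dict-counter accumulation with a partition loop: take the first remaining
-- symbol, count it, filter all its occurrences out, repeat (objective: alternative).


-- ===== PORT A =====
def symbol_to_string (symbols : List String) : String :=
  let element_counts : PySem.Dict String Int :=
    symbols.foldl (fun d element =>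
      if d.contains element then d.insert element (d.getD element 0 + 1)
      else d.insert element 1) PySem.Dict.empty
  element_counts.items.foldl (fun acc kv => acc ++ kv.1 ++ PySem.Int.toStr kv.2) ""

-- ===== PORT B =====
-- the while loop: parts is the accumulated pieces, rest the remaining symbols
def symbol_to_string_go (parts : List String) (rest : List String) : List String :=
  match rest with
  | [] => parts
  | e :: tail =>
      symbol_to_string_go
        (parts ++ [e ++ PySem.Int.toStr (PySem.List.count (e :: tail) e : Int)])
        (tail.filter (fun x => !(x == e)))
termination_by rest.length
decreasing_by
  simp only [List.length_unattach]
  exact Nat.lt_succ_of_le (le_trans (List.length_filter_le _ _) (by simp))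

def symbol_to_string_alt (symbols : List String) : String :=
  PySem.Str.join "" (symbol_to_string_go [] symbols)

-- ===== PRECONDITION & SPEC =====
def Spec_symbol_to_string (symbols : List String) (out : String) : Prop := out = symbol_to_string_alt symbols
instance (symbols : List String) (out : String) : Decidable (Spec_symbol_to_string symbols out) := by unfold Spec_symbol_to_string; infer_instance

-- ===== CLAIM (what is proved, stated in full; the proofs are below) =====
def Claim_equal_symbol_to_string : Prop := ∀ (symbols : List String), Dom_symbol_to_string symbols → Spec_symbol_to_string symbols (symbol_to_string symbols)

-- ===== LEMMAS AND PROOFS =====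

-- A's counting loop (with its in/else branch) is exactly the Counter fold.
theorem sts_branch_eq (symbols : List String) :
    symbols.foldl (fun d element =>
      if d.contains element then d.insert element (d.getD element 0 + 1)
      else d.insert element 1) PySem.Dict.empty
    = PySem.Dict.counter symbols := by
  rw [← PySem.Dict.foldl_insert_getD_add_one_eq_counter]
  congr 1
  funext d x
  by_cases h : d.contains x
  · simp [h]
  · simp only [Bool.not_eq_true] at h
    simp [h, PySem.Dict.getD_of_not_contains d 0 h]

theorem sts_join_empty_cons (a : String) (l : List String) :
    PySem.Str.join "" (a :: l) = a ++ PySem.Str.join "" l := by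
  cases l with
  | nil => simp [PySem.Str.join, PySem.Chars.join_singleton, PySem.Chars.join_nil]
  | cons b t => simp [PySem.Str.join, PySem.Chars.join_cons_cons]

-- A's concatenation loop over (element, count) pairs builds the join of the formatted pieces.
theorem sts_foldl_append_pairs (l : List (String × Int)) (s : String) :
    l.foldl (fun acc kv => acc ++ kv.1 ++ PySem.Int.toStr kv.2) s
    = s ++ PySem.Str.join "" (l.map (fun kv => kv.1 ++ PySem.Int.toStr kv.2)) := by
  induction l generalizing s with
  | nil => simp [PySem.Str.join, PySem.Chars.join_nil]
  | cons a t ih =>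
    rw [List.foldl_cons, ih, List.map_cons, sts_join_empty_cons]
    simp [String.append_assoc]

-- Building a Set from xs on top of s appends exactly the dedup of xs's elements not in s.
theorem sts_foldl_add (xs : List String) (s : PySem.Set String) :
    xs.foldl PySem.Set.add s
      = s ++ PySem.List.dedup (xs.filter (fun x => !(PySem.Set.contains s x))) := by
  match xs with
  | [] => simp [PySem.List.dedup, PySem.Set.ofList]
  | x :: xs =>
    by_cases h : PySem.Set.contains s x
    · simp only [List.foldl_cons, List.filter_cons, h, Bool.not_true]
      rw [if_neg (by simp)]
      rw [show PySem.Set.add s x = s by simp [PySem.Set.add, PySem.Set.contains] at h ⊢; simp [h]]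
      simpa using sts_foldl_add xs s
    · simp only [Bool.not_eq_true] at h
      simp only [List.foldl_cons, List.filter_cons, h, Bool.not_false]
      rw [if_pos trivial]
      rw [show PySem.Set.add s x = s ++ [x] by
            simp [PySem.Set.add, PySem.Set.contains] at h ⊢; simp [h]]
      rw [sts_foldl_add xs (s ++ [x])]
      have hd : PySem.List.dedup (x :: xs.filter (fun y => !(PySem.Set.contains s y)))
          = x :: PySem.List.dedup ((xs.filter (fun y => !(PySem.Set.contains s y))).filter
              (fun y => !(PySem.Set.contains ([x] : List String) y))) := by
        rw [PySem.List.dedup_eq_ofList, PySem.Set.ofList]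
        simp only [List.foldl_cons]
        rw [show PySem.Set.add (PySem.Set.empty (α := String)) x = [x] by rfl]
        rw [sts_foldl_add (xs.filter (fun y => !(PySem.Set.contains s y))) [x]]
        rfl
      rw [hd, List.filter_filter]
      have hfe : (fun y => !(PySem.Set.contains ([x] : List String) y)
                    && !(PySem.Set.contains s y))
          = (fun y => !(PySem.Set.contains (s ++ [x]) y)) := by
        funext y
        simp [PySem.Set.contains, Bool.and_comm]
      rw [hfe]
      simp
termination_by xs.length
decreasing_by
  · simp
  · simp
  · exact Nat.lt_succ_of_le (List.length_filter_le _ _)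

-- First-occurrence dedup of a cons: head, then dedup of the tail with the head filtered out.
theorem sts_dedup_cons (e : String) (rest : List String) :
    PySem.List.dedup (e :: rest)
      = e :: PySem.List.dedup (rest.filter (fun x => !(x == e))) := by
  rw [PySem.List.dedup_eq_ofList, PySem.Set.ofList]
  simp only [List.foldl_cons]
  rw [show PySem.Set.add (PySem.Set.empty (α := String)) e = [e] by rfl]
  rw [sts_foldl_add rest [e]]
  have : (fun x => !(PySem.Set.contains ([e] : List String) x)) = (fun x => !(x == e)) := by
    funext x; by_cases hx : x = e <;> simp [PySem.Set.contains, hx]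
  rw [this]
  rfl

-- B's partition loop appends, for each first occurrence, its symbol+count piece.
theorem sts_go_eq (rest : List String) (parts : List String) :
    symbol_to_string_go parts rest
      = parts ++ (PySem.List.dedup rest).map
          (fun e => e ++ PySem.Int.toStr (PySem.List.count rest e : Int)) := by
  match rest with
  | [] => simp [symbol_to_string_go, PySem.List.dedup, PySem.Set.ofList]
  | e :: tail =>
    have hmap : (PySem.List.dedup (tail.filter (fun x => !(x == e)))).map
          (fun x => x ++ PySem.Int.toStr
            ((PySem.List.count (tail.filter (fun y => !(y == e))) x : Int)))
        = (PySem.List.dedup (tail.filter (fun x => !(x == e)))).map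
          (fun x => x ++ PySem.Int.toStr ((PySem.List.count (e :: tail) x : Int))) := by
      apply List.map_congr_left
      intro x hx
      have hxne : x ≠ e := by
        have := (PySem.List.mem_dedup _ _).mp hx
        simp only [List.mem_filter] at this
        simpa using this.2
      have hc : PySem.List.count (tail.filter (fun y => !(y == e))) x
          = PySem.List.count (e :: tail) x := by
        simp only [PySem.List.count, List.count_cons]
        rw [List.count_filter (by simpa using hxne)]
        have h2 : (e == x) = false := by simpa using fun h => hxne h.symm
        simp [h2]
      rw [hc]
    rw [symbol_to_string_go, sts_go_eq (tail.filter (fun x => !(x == e))), hmap,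
      sts_dedup_cons, List.map_cons, List.append_assoc, List.singleton_append]
termination_by rest.length
decreasing_by
  exact Nat.lt_succ_of_le (List.length_filter_le _ _)

-- ===== VERDICT (by name: the statement is the Claim_ definition above) =====
theorem symbol_to_string_spec : Claim_equal_symbol_to_string := by
  intro symbols _
  unfold Spec_symbol_to_string symbol_to_string
  unfold symbol_to_string_alt
  rw [sts_branch_eq, sts_foldl_append_pairs, PySem.Dict.items_counter, sts_go_eq,
    PySem.List.dedup_eq_ofList, List.map_map, List.nil_append]
  simp [Function.comp_def]
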